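-- pv_equiv track=rewrite | github.com/Chenxiao-Tian/Data_Collection | src/data_collection/sources/open_data.py | _market_size_estimate
-- ===== SOURCE A (Python) =====
-- from typing import Any, Dict, Iterable, List, Optional
--
-- def _market_size_estimate(categories: Optional[Iterable[str]]) -> Optional[int]:
--     if not categories:
--         return None
--     normalized = {str(cat).lower() for cat in categories}
--     if normalized & {"artificial intelligence", "machine learning", "ai"}:
--         return 80_000_000_000
--     if normalized & {"fraud detection", "security", "compliance"}:
--         return 25_000_000_000
--     if normalized & {"productivity", "collaboration"}:
--         return 15_000_000_000
--     return 10_000_000_000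
-- ===== SOURCE B (Python) =====
-- from typing import Iterable, Optional
--
-- _TIER = {
--     "artificial intelligence": 0, "machine learning": 0, "ai": 0,
--     "fraud detection": 1, "security": 1, "compliance": 1,
--     "productivity": 2, "collaboration": 2,
-- }
-- _VALUES = [80_000_000_000, 25_000_000_000, 15_000_000_000, 10_000_000_000]
--
-- def _market_size_estimate(categories: Optional[Iterable[str]]) -> Optional[int]:
--     if not categories:
--         return None
--     best = 3
--     for cat in categories:
--         best = min(best, _TIER.get(str(cat).lower(), 3))
--     return _VALUES[best]
-- ===== Notes on version B (the rewrite author's own statement) =====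
-- stated objective: simpler
-- what changed: Replaces building a set of lowered categories and testing three sequential set intersections by a single min-tracking pass over the categories with a keyword-to-tier table and a tier-to-value list.
import Mathlib
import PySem

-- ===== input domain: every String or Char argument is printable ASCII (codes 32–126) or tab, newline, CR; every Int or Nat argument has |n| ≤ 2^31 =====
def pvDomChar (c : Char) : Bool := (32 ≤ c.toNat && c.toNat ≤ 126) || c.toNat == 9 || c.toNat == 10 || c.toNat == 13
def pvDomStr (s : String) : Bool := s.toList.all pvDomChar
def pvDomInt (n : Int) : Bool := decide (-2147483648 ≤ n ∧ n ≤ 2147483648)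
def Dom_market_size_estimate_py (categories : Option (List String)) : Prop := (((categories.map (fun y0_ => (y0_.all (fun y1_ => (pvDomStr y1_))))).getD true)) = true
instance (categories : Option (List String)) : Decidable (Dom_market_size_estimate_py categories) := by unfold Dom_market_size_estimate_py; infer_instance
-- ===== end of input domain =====

-- B replaces A's set-building plus three sequential set-intersection branches by one
-- min-tracking pass over the categories with a keyword→tier table (objective: simpler).

-- ===== PORT A =====
def market_size_estimate_py (categories : Option (List String)) : Option Int :=
  match categories with
  | none => none
  | some cs =>
    if cs = [] then none
    else
      let normalized : PySem.Set String := PySem.Set.ofList (cs.map (fun cat => PySem.Str.lower cat))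
      if PySem.Set.inter normalized ["artificial intelligence", "machine learning", "ai"] ≠ [] then
        some 80000000000
      else if PySem.Set.inter normalized ["fraud detection", "security", "compliance"] ≠ [] then
        some 25000000000
      else if PySem.Set.inter normalized ["productivity", "collaboration"] ≠ [] then
        some 15000000000
      else
        some 10000000000

-- ===== PORT B =====
def pvTierDict : PySem.Dict String Nat := PySem.Dict.ofList
  [("artificial intelligence", 0), ("machine learning", 0), ("ai", 0),
   ("fraud detection", 1), ("security", 1), ("compliance", 1),
   ("productivity", 2), ("collaboration", 2)]

def pvValues : List Int := [80000000000, 25000000000, 15000000000, 10000000000]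

def market_size_estimate_py_alt (categories : Option (List String)) : Option Int :=
  match categories with
  | none => none
  | some cs =>
    if cs = [] then none
    else
      let best := cs.foldl (fun b cat => min b (PySem.Dict.getD pvTierDict (PySem.Str.lower cat) 3)) 3
      some (pvValues.getD best 0)

-- ===== PRECONDITION & SPEC =====
def Spec_market_size_estimate_py (categories : Option (List String)) (out : Option Int) : Prop := out = market_size_estimate_py_alt categories
instance (categories : Option (List String)) (out : Option Int) : Decidable (Spec_market_size_estimate_py categories out) := by unfold Spec_market_size_estimate_py; infer_instance

-- ===== CLAIM (what is proved, stated in full; the proofs are below) =====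
def Claim_equal_market_size_estimate_py : Prop := ∀ (categories : Option (List String)), Dom_market_size_estimate_py categories → Spec_market_size_estimate_py categories (market_size_estimate_py categories)

-- ===== LEMMAS AND PROOFS =====

-- the tier of a (lowered) category string, as B computes it
def pvTier (k : String) : Nat := PySem.Dict.getD pvTierDict k 3

set_option maxHeartbeats 2000000 in
set_option maxRecDepth 8192 in
lemma pvTier_eq (k : String) : pvTier k =
    if k = "artificial intelligence" then 0 else if k = "machine learning" then 0
    else if k = "ai" then 0 else if k = "fraud detection" then 1
    else if k = "security" then 1 else if k = "compliance" then 1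
    else if k = "productivity" then 2 else if k = "collaboration" then 2 else 3 := by
  have h : pvTierDict = PySem.Dict.mk
    [("artificial intelligence", 0), ("machine learning", 0), ("ai", 0),
     ("fraud detection", 1), ("security", 1), ("compliance", 1),
     ("productivity", 2), ("collaboration", 2)] := rfl
  unfold pvTier
  rw [h]
  simp only [PySem.Dict.getD_eq_get?_getD, PySem.Dict.get?_mk_cons, beq_iff_eq]
  split_ifs <;> try subst_vars
  all_goals try rfl
  all_goals simp_all

lemma pvTier_le_three (k : String) : pvTier k ≤ 3 := by
  rw [pvTier_eq]; split_ifs <;> omega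

lemma pvTier_eq_zero_iff (k : String) :
    pvTier k = 0 ↔ k ∈ ["artificial intelligence", "machine learning", "ai"] := by
  rw [pvTier_eq]; split_ifs <;> simp_all

lemma pvTier_le_one_iff (k : String) :
    pvTier k ≤ 1 ↔ k ∈ ["artificial intelligence", "machine learning", "ai"] ∨
      k ∈ ["fraud detection", "security", "compliance"] := by
  rw [pvTier_eq]; split_ifs <;> simp_all

lemma pvTier_le_two_iff (k : String) :
    pvTier k ≤ 2 ↔ k ∈ ["artificial intelligence", "machine learning", "ai"] ∨
      k ∈ ["fraud detection", "security", "compliance"] ∨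
      k ∈ ["productivity", "collaboration"] := by
  rw [pvTier_eq]; split_ifs <;> simp_all

-- B's fold, named for the proofs
def pvBest (cs : List String) : Nat :=
  cs.foldl (fun b cat => min b (pvTier (PySem.Str.lower cat))) 3

lemma pvBest_min (cs : List String) (b : Nat) (hb : b ≤ 3) :
    cs.foldl (fun a cat => min a (pvTier (PySem.Str.lower cat))) b = min b (pvBest cs) := by
  induction cs generalizing b with
  | nil => simp only [pvBest, List.foldl_nil]; omega
  | cons c t ih =>
    have h3 := pvTier_le_three (PySem.Str.lower c)
    simp only [pvBest, List.foldl_cons] at *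
    rw [ih _ (by omega), ih (min 3 _) (by omega)]
    omega

lemma pvBest_cons (c : String) (t : List String) :
    pvBest (c :: t) = min (pvTier (PySem.Str.lower c)) (pvBest t) := by
  have h3 := pvTier_le_three (PySem.Str.lower c)
  conv_lhs => rw [pvBest, List.foldl_cons]
  rw [pvBest_min _ _ (by omega)]
  omega

lemma pvBest_le_three (cs : List String) : pvBest cs ≤ 3 := by
  induction cs with
  | nil => simp [pvBest]
  | cons c t ih => rw [pvBest_cons]; omega

lemma pvBest_eq_zero_iff (cs : List String) :
    pvBest cs = 0 ↔ ∃ c ∈ cs, pvTier (PySem.Str.lower c) = 0 := by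
  induction cs with
  | nil => simp [pvBest]
  | cons c t ih => rw [pvBest_cons]; simp [Nat.min_eq_zero_iff, ih]

lemma pvBest_le_one_iff (cs : List String) :
    pvBest cs ≤ 1 ↔ ∃ c ∈ cs, pvTier (PySem.Str.lower c) ≤ 1 := by
  induction cs with
  | nil => simp [pvBest]
  | cons c t ih => rw [pvBest_cons]; simp [ih]

lemma pvBest_le_two_iff (cs : List String) :
    pvBest cs ≤ 2 ↔ ∃ c ∈ cs, pvTier (PySem.Str.lower c) ≤ 2 := by
  induction cs with
  | nil => simp [pvBest]
  | cons c t ih => rw [pvBest_cons]; simp [ih]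

-- A's intersection test, reduced to an existential over the original list
lemma inter_ne_nil_iff (cs : List String) (t : List String) :
    PySem.Set.inter (PySem.Set.ofList (cs.map (fun cat => PySem.Str.lower cat))) t ≠ [] ↔
      ∃ c ∈ cs, PySem.Str.lower c ∈ t := by
  rw [ne_eq, List.eq_nil_iff_forall_not_mem]
  push Not
  constructor
  · rintro ⟨x, hx⟩
    rw [PySem.Set.mem_inter, PySem.Set.mem_ofList, List.mem_map] at hx
    obtain ⟨⟨c, hc, rfl⟩, hxt⟩ := hx
    exact ⟨c, hc, hxt⟩
  · rintro ⟨c, hc, ht⟩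
    exact ⟨PySem.Str.lower c, by
      rw [PySem.Set.mem_inter, PySem.Set.mem_ofList, List.mem_map]
      exact ⟨⟨c, hc, rfl⟩, ht⟩⟩

-- ===== VERDICT (by name: the statement is the Claim_ definition above) =====
theorem market_size_estimate_py_spec : Claim_equal_market_size_estimate_py := by
  intro categories _
  unfold Spec_market_size_estimate_py market_size_estimate_py market_size_estimate_py_alt
  match categories with
  | none => rfl
  | some cs =>
    by_cases hnil : cs = []
    · simp [hnil]
    · simp only [hnil, if_false]
      have hbest3 := pvBest_le_three cs
      show _ = some (pvValues.getD (pvBest cs) 0)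
      simp only [inter_ne_nil_iff]
      by_cases h0 : ∃ c ∈ cs, PySem.Str.lower c ∈ ["artificial intelligence", "machine learning", "ai"]
      · have hb : pvBest cs = 0 := by
          rw [pvBest_eq_zero_iff]
          obtain ⟨c, hc, hm⟩ := h0
          exact ⟨c, hc, (pvTier_eq_zero_iff _).mpr hm⟩
        rw [if_pos h0, hb]
        rfl
      · rw [if_neg h0]
        by_cases h1 : ∃ c ∈ cs, PySem.Str.lower c ∈ ["fraud detection", "security", "compliance"]
        · have hle : pvBest cs ≤ 1 := by
            rw [pvBest_le_one_iff]
            obtain ⟨c, hc, hm⟩ := h1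
            exact ⟨c, hc, (pvTier_le_one_iff _).mpr (Or.inr hm)⟩
          have hne : ¬ pvBest cs = 0 := by
            rw [pvBest_eq_zero_iff]
            rintro ⟨c, hc, hz⟩
            exact h0 ⟨c, hc, (pvTier_eq_zero_iff _).mp hz⟩
          have hb : pvBest cs = 1 := by omega
          rw [if_pos h1, hb]
          rfl
        · rw [if_neg h1]
          by_cases h2 : ∃ c ∈ cs, PySem.Str.lower c ∈ ["productivity", "collaboration"]
          · have hle : pvBest cs ≤ 2 := by
              rw [pvBest_le_two_iff]
              obtain ⟨c, hc, hm⟩ := h2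
              exact ⟨c, hc, (pvTier_le_two_iff _).mpr (Or.inr (Or.inr hm))⟩
            have hgt : ¬ pvBest cs ≤ 1 := by
              rw [pvBest_le_one_iff]
              rintro ⟨c, hc, hz⟩
              rcases (pvTier_le_one_iff _).mp hz with hm | hm
              · exact h0 ⟨c, hc, hm⟩
              · exact h1 ⟨c, hc, hm⟩
            have hb : pvBest cs = 2 := by omega
            rw [if_pos h2, hb]
            rfl
          · have hgt : ¬ pvBest cs ≤ 2 := by
              rw [pvBest_le_two_iff]
              rintro ⟨c, hc, hz⟩
              rcases (pvTier_le_two_iff _).mp hz with hm | hm | hm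
              · exact h0 ⟨c, hc, hm⟩
              · exact h1 ⟨c, hc, hm⟩
              · exact h2 ⟨c, hc, hm⟩
            have hb : pvBest cs = 3 := by omega
            rw [if_neg h2, hb]
            rfl
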